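-- pv_equiv track=rewrite | github.com/acoop1117/Nemotron | src/nemotron/kit/app.py | _extract_run_args
-- ===== SOURCE A (Python) =====
-- def _extract_run_args(args: list[str]) -> tuple[str | None, dict[str, str], list[str], bool]:
--     """Extract --run/--batch and --run.<key>/--batch.<key> arguments.
--
--     Args:
--         args: Command line arguments
--
--     Returns:
--         Tuple of (run_name, run_overrides, remaining_args, is_launch).
--         is_launch is True when --batch was used (implies detach=True).
--
--     Raises:
--         ValueError: If both --run and --batch are specified.
--     """
--     run_name: str | None = None
--     launch_name: str | None = None
--     run_overrides: dict[str, str] = {}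
--     remaining: list[str] = []
--
--     i = 0
--     while i < len(args):
--         arg = args[i]
--
--         # Handle --run / -r
--         if arg == "--run" or arg == "-r":
--             if i + 1 < len(args):
--                 run_name = args[i + 1]
--                 i += 2
--             else:
--                 remaining.append(arg)
--                 i += 1
--         elif arg.startswith("--run."):
--             key = arg[6:]  # Remove "--run."
--             if i + 1 < len(args):
--                 run_overrides[key] = args[i + 1]
--                 i += 2
--             else:
--                 remaining.append(arg)
--                 i += 1
--         elif arg.startswith("--run="):
--             run_name = arg[6:]
--             i += 1
--         elif arg.startswith("-r="):
--             run_name = arg[3:]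
--             i += 1
--         # Handle --batch / -b
--         elif arg == "--batch" or arg == "-b":
--             if i + 1 < len(args):
--                 launch_name = args[i + 1]
--                 i += 2
--             else:
--                 remaining.append(arg)
--                 i += 1
--         elif arg.startswith("--batch."):
--             key = arg[8:]  # Remove "--batch."
--             if i + 1 < len(args):
--                 run_overrides[key] = args[i + 1]
--                 i += 2
--             else:
--                 remaining.append(arg)
--                 i += 1
--         elif arg.startswith("--batch="):
--             launch_name = arg[8:]
--             i += 1
--         elif arg.startswith("-b="):
--             launch_name = arg[3:]
--             i += 1
--         else:
--             remaining.append(arg)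
--             i += 1
--
--     # Validate mutual exclusivity
--     if run_name is not None and launch_name is not None:
--         raise ValueError(
--             "--run and --batch are mutually exclusive. "
--             "Use --run for attached execution or --batch for detached execution."
--         )
--
--     # Determine final name and whether launch mode is active
--     is_launch = launch_name is not None
--     final_name = launch_name if is_launch else run_name
--
--     return final_name, run_overrides, remaining, is_launch
-- ===== SOURCE B (Python) =====
-- def _extract_run_args(args: list[str]) -> tuple[str | None, dict[str, str], list[str], bool]:
--     """Single for-loop with a 'pending' slot instead of index lookahead."""
--     run_name = None
--     launch_name = None
--     run_overrides = {}
--     remaining = []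
--     pending = None  # ("run", tok) | ("batch", tok) | ("ovr", key, tok)
--
--     for arg in args:
--         if pending is not None:
--             if pending[0] == "run":
--                 run_name = arg
--             elif pending[0] == "batch":
--                 launch_name = arg
--             else:
--                 run_overrides[pending[1]] = arg
--             pending = None
--         elif arg == "--run" or arg == "-r":
--             pending = ("run", arg)
--         elif arg.startswith("--run."):
--             pending = ("ovr", arg[6:], arg)
--         elif arg.startswith("--run="):
--             run_name = arg[6:]
--         elif arg.startswith("-r="):
--             run_name = arg[3:]
--         elif arg == "--batch" or arg == "-b":
--             pending = ("batch", arg)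
--         elif arg.startswith("--batch."):
--             pending = ("ovr", arg[8:], arg)
--         elif arg.startswith("--batch="):
--             launch_name = arg[8:]
--         elif arg.startswith("-b="):
--             launch_name = arg[3:]
--         else:
--             remaining.append(arg)
--
--     if pending is not None:
--         remaining.append(pending[-1])
--
--     if run_name is not None and launch_name is not None:
--         raise ValueError(
--             "--run and --batch are mutually exclusive. "
--             "Use --run for attached execution or --batch for detached execution."
--         )
--
--     is_launch = launch_name is not None
--     final_name = launch_name if is_launch else run_name
--     return final_name, run_overrides, remaining, is_launch
-- ===== Notes on version B (the rewrite author's own statement) =====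
-- stated objective: alternative
-- what changed: Replaced A's index-based while loop with i+1 lookahead (and i += 2 skips) by a single for-loop over the arguments that carries a 'pending flag' slot: a value-expecting flag sets the slot and the next iteration fills and clears it; a dangling trailing flag appends its original token after the loop.
import Mathlib
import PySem

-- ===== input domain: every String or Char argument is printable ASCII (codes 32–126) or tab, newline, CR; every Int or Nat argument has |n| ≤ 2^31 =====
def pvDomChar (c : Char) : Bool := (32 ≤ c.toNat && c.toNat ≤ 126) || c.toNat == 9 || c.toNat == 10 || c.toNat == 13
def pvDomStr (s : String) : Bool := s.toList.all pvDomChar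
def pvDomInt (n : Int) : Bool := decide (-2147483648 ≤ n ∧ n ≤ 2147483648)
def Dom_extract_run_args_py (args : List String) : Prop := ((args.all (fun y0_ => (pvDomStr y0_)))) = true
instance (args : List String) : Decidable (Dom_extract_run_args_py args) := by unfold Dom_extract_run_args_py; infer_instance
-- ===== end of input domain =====

-- B replaces A's index-with-lookahead while loop by a single pass carrying a 'pending' slot; same values, alternative decomposition.
-- Both Pythons raise ValueError when --run and --batch are both set; Pre_ excludes exactly those inputs.

-- ===== PORT A =====
-- A's while loop over index i: it only reads args[i] and args[i+1], so it is the
-- structural recursion on the remaining suffix; state = (run_name, launch_name, run_overrides, remaining).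
def loopA_extract (args : List String) (rn ln : Option String)
    (ov : PySem.Dict String String) (rem : List String) :
    Option String × Option String × PySem.Dict String String × List String :=
  match args with
  | [] => (rn, ln, ov, rem)
  | arg :: rest =>
    if arg == "--run" || arg == "-r" then
      match rest with
      | v :: rest2 => loopA_extract rest2 (some v) ln ov rem
      | [] => (rn, ln, ov, rem ++ [arg])
    else if PySem.Str.startswith arg "--run." then
      match rest with
      | v :: rest2 => loopA_extract rest2 rn ln (ov.insert (PySem.Str.slice arg (some 6) none) v) rem
      | [] => (rn, ln, ov, rem ++ [arg])
    else if PySem.Str.startswith arg "--run=" then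
      loopA_extract rest (some (PySem.Str.slice arg (some 6) none)) ln ov rem
    else if PySem.Str.startswith arg "-r=" then
      loopA_extract rest (some (PySem.Str.slice arg (some 3) none)) ln ov rem
    else if arg == "--batch" || arg == "-b" then
      match rest with
      | v :: rest2 => loopA_extract rest2 rn (some v) ov rem
      | [] => (rn, ln, ov, rem ++ [arg])
    else if PySem.Str.startswith arg "--batch." then
      match rest with
      | v :: rest2 => loopA_extract rest2 rn ln (ov.insert (PySem.Str.slice arg (some 8) none) v) rem
      | [] => (rn, ln, ov, rem ++ [arg])
    else if PySem.Str.startswith arg "--batch=" then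
      loopA_extract rest rn (some (PySem.Str.slice arg (some 8) none)) ov rem
    else if PySem.Str.startswith arg "-b=" then
      loopA_extract rest rn (some (PySem.Str.slice arg (some 3) none)) ov rem
    else
      loopA_extract rest rn ln ov (rem ++ [arg])

-- On the inputs admitted by Pre_ the ValueError branch is unreachable; the port returns the final tuple.
def extract_run_args_py (args : List String) :
    Option String × (List (String × String)) × List String × Bool :=
  match loopA_extract args none none PySem.Dict.empty [] with
  | (rn, ln, ov, rem) =>
    let is_launch := ln.isSome
    ((if is_launch then ln else rn), ov.items, rem, is_launch)

-- ===== PORT B =====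
-- B's pending slot: which flag is waiting for its value, remembering the original token.
inductive PendSlot where
  | run (tok : String)
  | batch (tok : String)
  | ovr (key tok : String)
deriving DecidableEq, Repr

def pendSlotTok : PendSlot → String
  | .run t => t
  | .batch t => t
  | .ovr _ t => t

def loopB_extract (args : List String) (pend : Option PendSlot) (rn ln : Option String)
    (ov : PySem.Dict String String) (rem : List String) :
    Option String × Option String × PySem.Dict String String × List String :=
  match args with
  | [] =>
    match pend with
    | none => (rn, ln, ov, rem)
    | some p => (rn, ln, ov, rem ++ [pendSlotTok p])
  | arg :: rest =>
    match pend with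
    | some (.run _) => loopB_extract rest none (some arg) ln ov rem
    | some (.batch _) => loopB_extract rest none rn (some arg) ov rem
    | some (.ovr k _) => loopB_extract rest none rn ln (ov.insert k arg) rem
    | none =>
      if arg == "--run" || arg == "-r" then
        loopB_extract rest (some (.run arg)) rn ln ov rem
      else if PySem.Str.startswith arg "--run." then
        loopB_extract rest (some (.ovr (PySem.Str.slice arg (some 6) none) arg)) rn ln ov rem
      else if PySem.Str.startswith arg "--run=" then
        loopB_extract rest none (some (PySem.Str.slice arg (some 6) none)) ln ov rem
      else if PySem.Str.startswith arg "-r=" then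
        loopB_extract rest none (some (PySem.Str.slice arg (some 3) none)) ln ov rem
      else if arg == "--batch" || arg == "-b" then
        loopB_extract rest (some (.batch arg)) rn ln ov rem
      else if PySem.Str.startswith arg "--batch." then
        loopB_extract rest (some (.ovr (PySem.Str.slice arg (some 8) none) arg)) rn ln ov rem
      else if PySem.Str.startswith arg "--batch=" then
        loopB_extract rest none rn (some (PySem.Str.slice arg (some 8) none)) ov rem
      else if PySem.Str.startswith arg "-b=" then
        loopB_extract rest none rn (some (PySem.Str.slice arg (some 3) none)) ov rem
      else
        loopB_extract rest none rn ln ov (rem ++ [arg])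

def extract_run_args_py_alt (args : List String) :
    Option String × (List (String × String)) × List String × Bool :=
  match loopB_extract args none none none PySem.Dict.empty [] with
  | (rn, ln, ov, rem) =>
    let is_launch := ln.isSome
    ((if is_launch then ln else rn), ov.items, rem, is_launch)

-- ===== PRECONDITION & SPEC =====
-- A (and B) raises ValueError exactly when both a --run name and a --batch name end up set;
-- preScan_extract tracks only the two booleans "run set" / "batch set" (pend: 1 = next token fills run,
-- 2 = fills batch, 3 = consumed as an override value, 0 = no pending flag). Pre_ excludes only raising inputs.
def preScan_extract (args : List String) (pend : Nat) (r b : Bool) : Bool × Bool :=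
  match args with
  | [] => (r, b)
  | arg :: rest =>
    match pend with
    | 1 => preScan_extract rest 0 true b
    | 2 => preScan_extract rest 0 r true
    | 3 => preScan_extract rest 0 r b
    | _ =>
      if arg == "--run" || arg == "-r" then preScan_extract rest 1 r b
      else if PySem.Str.startswith arg "--run." then preScan_extract rest 3 r b
      else if PySem.Str.startswith arg "--run=" then preScan_extract rest 0 true b
      else if PySem.Str.startswith arg "-r=" then preScan_extract rest 0 true b
      else if arg == "--batch" || arg == "-b" then preScan_extract rest 2 r b
      else if PySem.Str.startswith arg "--batch." then preScan_extract rest 3 r b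
      else if PySem.Str.startswith arg "--batch=" then preScan_extract rest 0 r true
      else if PySem.Str.startswith arg "-b=" then preScan_extract rest 0 r true
      else preScan_extract rest 0 r b

def Pre_extract_run_args_py (args : List String) : Prop :=
  ¬ ((preScan_extract args 0 false false).1 = true ∧ (preScan_extract args 0 false false).2 = true)
instance (args : List String) : Decidable (Pre_extract_run_args_py args) := by
  unfold Pre_extract_run_args_py; infer_instance

def pvWitness_extract_run_args_py : List String := ["--run", "myrun", "--run.lr", "0.1", "train"]

def Spec_extract_run_args_py (args : List String) (out : Option String × (List (String × String)) × List String × Bool) : Prop := out = extract_run_args_py_alt args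
instance (args : List String) (out : Option String × (List (String × String)) × List String × Bool) : Decidable (Spec_extract_run_args_py args out) := by unfold Spec_extract_run_args_py; infer_instance

-- ===== CLAIM (what is proved, stated in full; the proofs are below) =====
def Claim_equal_extract_run_args_py : Prop := ∀ (args : List String), Dom_extract_run_args_py args → Pre_extract_run_args_py args → Spec_extract_run_args_py args (extract_run_args_py args)

-- ===== LEMMAS AND PROOFS =====
-- Core invariant: A's lookahead loop and B's pending-slot loop (started with no pending flag)
-- compute the same final state from any common state.
lemma loop_extract_eq (args : List String) (rn ln : Option String)
    (ov : PySem.Dict String String) (rem : List String) :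
    loopA_extract args rn ln ov rem = loopB_extract args none rn ln ov rem := by
  induction args, rn, ln, ov, rem using loopA_extract.induct with
  | case1 rn ln ov rem => simp [loopA_extract, loopB_extract]
  | _ => rw [loopA_extract.eq_def]; simp_all [loopB_extract, pendSlotTok]

-- ===== VERDICT (by name: the statement is the Claim_ definition above) =====
theorem extract_run_args_py_spec : Claim_equal_extract_run_args_py := by
  intro args _ _
  unfold Spec_extract_run_args_py extract_run_args_py extract_run_args_py_alt
  rw [loop_extract_eq]
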